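-- pv_equiv track=rewrite | github.com/linkeLi0421/auto-bug-migration | script/react_agent/tools/ossfuzz_tools.py | _strip_first_hunk_minus_lines
-- ===== SOURCE A (Python) =====
-- def _strip_first_hunk_minus_lines(patch_text: str) -> str:
--     """Return patch_text with '-' diff lines removed from the first hunk body (keeps headers and context)."""
--     raw = str(patch_text or "")
--     if not raw.strip():
--         return ""
--     lines = raw.splitlines()
--     first_hunk = next((i for i, l in enumerate(lines) if l.startswith("@@")), -1)
--     if first_hunk < 0:
--         return raw.rstrip("\n") + "\n"
--
--     end = len(lines)
--     for i in range(first_hunk + 1, len(lines)):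
--         if lines[i].startswith("@@") or lines[i].startswith("diff --git "):
--             end = i
--             break
--
--     body = [l for l in lines[first_hunk + 1 : end] if not (l.startswith("-") and not l.startswith("---"))]
--     updated = lines[: first_hunk + 1] + body + lines[end:]
--     return "\n".join(updated).rstrip("\n") + "\n"
-- ===== SOURCE B (Python) =====
-- def _strip_first_hunk_minus_lines(patch_text: str) -> str:
--     """Return patch_text with '-' diff lines removed from the first hunk body (keeps headers and context)."""
--     raw = str(patch_text or "")
--     if not raw.strip():
--         return ""
--     lines = raw.splitlines()
--     if not any(l.startswith("@@") for l in lines):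
--         return raw.rstrip("\n") + "\n"
--     out = []
--     state = 0  # 0 = before first hunk header, 1 = inside first hunk body, 2 = past it
--     for l in lines:
--         if state == 0:
--             if l.startswith("@@"):
--                 state = 1
--             out.append(l)
--         elif state == 1:
--             if l.startswith("@@") or l.startswith("diff --git "):
--                 state = 2
--                 out.append(l)
--             elif l.startswith("-") and not l.startswith("---"):
--                 pass
--             else:
--                 out.append(l)
--         else:
--             out.append(l)
--     return "\n".join(out).rstrip("\n") + "\n"
-- ===== Notes on version B (the rewrite author's own statement) =====
-- stated objective: simpler
-- what changed: Replaces A's index hunting (enumerate/next to locate the first hunk header, an index loop with break to find the hunk end, then slice + filter + slice concatenation) by one flag-driven pass over the lines that drops removed-line diff lines from the first hunk body while a small state variable tracks whether we are inside it.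
import Mathlib
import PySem

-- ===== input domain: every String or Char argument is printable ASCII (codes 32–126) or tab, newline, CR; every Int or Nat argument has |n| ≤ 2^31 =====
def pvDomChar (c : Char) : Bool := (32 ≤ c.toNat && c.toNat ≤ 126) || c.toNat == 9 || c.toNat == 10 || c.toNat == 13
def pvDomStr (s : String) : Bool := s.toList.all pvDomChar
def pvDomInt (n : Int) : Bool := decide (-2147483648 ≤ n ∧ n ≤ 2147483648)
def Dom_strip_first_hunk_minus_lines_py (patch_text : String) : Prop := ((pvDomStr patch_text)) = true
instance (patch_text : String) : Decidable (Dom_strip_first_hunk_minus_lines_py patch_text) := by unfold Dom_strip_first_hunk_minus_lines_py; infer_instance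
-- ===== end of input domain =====

-- B replaces A's index hunting (find first '@@', scan for the hunk end, slice-filter-concatenate)
-- by one flag-driven pass over the lines; objective: simpler, same return value everywhere.

-- shared primitive: Python's  s.rstrip("\n")  on the char list (strip only '\n' from the right; exact)
def pyRstripNl (cs : List Char) : List Char := (cs.reverse.dropWhile (· == '\n')).reverse

-- ===== PORT A =====
-- the 'for i in range(first_hunk+1, len(lines)): if …: end = i; break' loop, literally
def pvEndA (ls : List (List Char)) (i : Nat) : Nat :=
  if h : i < ls.length then
    if PySem.Chars.startswith ls[i] ['@', '@'] || PySem.Chars.startswith ls[i] ['d', 'i', 'f', 'f', ' ', '-', '-', 'g', 'i', 't', ' '] then i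
    else pvEndA ls (i + 1)
  else ls.length
termination_by ls.length - i

def strip_first_hunk_minus_lines_py (patch_text : String) : String :=
  let raw := patch_text.toList
  if PySem.Chars.strip raw = [] then ""
  else
    let lines := PySem.Chars.splitlines raw
    let firstHunk : Int :=
      (((PySem.List.enumerate lines).find? (fun p => PySem.Chars.startswith p.2 ['@', '@'])).map
        Prod.fst).getD (-1)
    if firstHunk < 0 then String.ofList (pyRstripNl raw ++ ['\n'])
    else
      let e := pvEndA lines (firstHunk.toNat + 1)
      let body := (PySem.List.slice lines (some (firstHunk + 1)) (some (e : Int))).filter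
        (fun l => !(PySem.Chars.startswith l ['-'] && !PySem.Chars.startswith l ['-', '-', '-']))
      let updated := PySem.List.slice lines none (some (firstHunk + 1)) ++ body
        ++ PySem.List.slice lines (some (e : Int)) none
      String.ofList (pyRstripNl (PySem.Chars.join ['\n'] updated) ++ ['\n'])

-- ===== PORT B =====
-- the single flag-driven pass (state 0 = before first hunk header, 1 = inside its body, 2 = past it)
def pvLoopB (ls : List (List Char)) (state : Nat) : List (List Char) :=
  match ls with
  | [] => []
  | l :: rest =>
    if state == 0 then
      if PySem.Chars.startswith l ['@', '@'] then l :: pvLoopB rest 1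
      else l :: pvLoopB rest 0
    else if state == 1 then
      if PySem.Chars.startswith l ['@', '@'] || PySem.Chars.startswith l ['d', 'i', 'f', 'f', ' ', '-', '-', 'g', 'i', 't', ' '] then
        l :: pvLoopB rest 2
      else if PySem.Chars.startswith l ['-'] && !PySem.Chars.startswith l ['-', '-', '-'] then
        pvLoopB rest 1
      else l :: pvLoopB rest 1
    else l :: pvLoopB rest 2

def strip_first_hunk_minus_lines_py_alt (patch_text : String) : String :=
  let raw := patch_text.toList
  if PySem.Chars.strip raw = [] then ""
  else
    let lines := PySem.Chars.splitlines raw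
    if !(lines.any (fun l => PySem.Chars.startswith l ['@', '@'])) then String.ofList (pyRstripNl raw ++ ['\n'])
    else String.ofList (pyRstripNl (PySem.Chars.join ['\n'] (pvLoopB lines 0)) ++ ['\n'])

-- ===== PRECONDITION & SPEC =====
def Spec_strip_first_hunk_minus_lines_py (patch_text : String) (out : String) : Prop := out = strip_first_hunk_minus_lines_py_alt patch_text
instance (patch_text : String) (out : String) : Decidable (Spec_strip_first_hunk_minus_lines_py patch_text out) := by unfold Spec_strip_first_hunk_minus_lines_py; infer_instance

-- ===== CLAIM (what is proved, stated in full; the proofs are below) =====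
def Claim_equal_strip_first_hunk_minus_lines_py : Prop := ∀ (patch_text : String), Dom_strip_first_hunk_minus_lines_py patch_text → Spec_strip_first_hunk_minus_lines_py patch_text (strip_first_hunk_minus_lines_py patch_text)

-- ===== LEMMAS AND PROOFS =====

-- proof-only structural mirror of pvEndA: length of the first-hunk body
def pvE (ls : List (List Char)) : Nat :=
  match ls with
  | [] => 0
  | l :: t =>
    if PySem.Chars.startswith l ['@', '@'] || PySem.Chars.startswith l ['d', 'i', 'f', 'f', ' ', '-', '-', 'g', 'i', 't', ' '] then 0
    else pvE t + 1

theorem pvEndA_append (ys xs : List (List Char)) :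
    pvEndA (xs ++ ys) xs.length = xs.length + pvE ys := by
  induction ys generalizing xs with
  | nil => unfold pvEndA pvE; simp
  | cons y t ih =>
    unfold pvEndA pvE
    have hlt : xs.length < (xs ++ y :: t).length := by simp
    rw [dif_pos hlt]
    have hg : (xs ++ y :: t)[xs.length] = y := by
      simp [List.getElem_append_right (Nat.le_refl xs.length)]
    rw [hg]
    split_ifs with h
    · omega
    · have := ih (xs ++ [y])
      simp only [List.length_append, List.length_cons, List.length_nil, Nat.zero_add] at this ⊢
      rw [show xs ++ y :: t = (xs ++ [y]) ++ t by simp] at *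
      omega

theorem pvLoopB_two (ls : List (List Char)) : pvLoopB ls 2 = ls := by
  induction ls with
  | nil => rfl
  | cons l t ih => simp [pvLoopB, ih]

theorem pvLoopB_one (ls : List (List Char)) :
    pvLoopB ls 1 =
      (ls.take (pvE ls)).filter
          (fun l => !(PySem.Chars.startswith l ['-'] && !PySem.Chars.startswith l ['-', '-', '-']))
        ++ ls.drop (pvE ls) := by
  induction ls with
  | nil => rfl
  | cons l t ih =>
    simp only [pvLoopB, pvE]
    norm_num
    split_ifs with h1 h2
    all_goals simp_all [pvLoopB_two, List.filter_cons]
    all_goals first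
      | rfl
      | (split_ifs <;> simp_all)

theorem pvLoopB_zero (pre rest : List (List Char)) (h : List Char)
    (hpre : ∀ l ∈ pre, PySem.Chars.startswith l ['@', '@'] = false)
    (hh : PySem.Chars.startswith h ['@', '@'] = true) :
    pvLoopB (pre ++ h :: rest) 0 = pre ++ h :: pvLoopB rest 1 := by
  induction pre with
  | nil => simp [pvLoopB, hh]
  | cons p t ih =>
    have hp := hpre p (by simp)
    simp only [List.cons_append, pvLoopB, hp, if_false, Bool.false_eq_true]
    simp only [beq_self_eq_true, if_true]
    rw [ih (fun l hl => hpre l (by simp [hl]))]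

theorem find_enumerate (pre rest : List (List Char)) (h : List Char) (s : Int)
    (hpre : ∀ l ∈ pre, PySem.Chars.startswith l ['@', '@'] = false)
    (hh : PySem.Chars.startswith h ['@', '@'] = true) :
    (PySem.List.enumerate (pre ++ h :: rest) s).find?
        (fun p => PySem.Chars.startswith p.2 ['@', '@']) = some (s + pre.length, h) := by
  induction pre generalizing s with
  | nil => simp [PySem.List.enumerate_cons, hh]
  | cons p t ih =>
    have hp := hpre p (by simp)
    simp only [List.cons_append, PySem.List.enumerate_cons, List.find?_cons, hp]
    rw [ih (s + 1) (fun l hl => hpre l (by simp [hl]))]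
    congr 2
    simp only [List.length_cons]
    push_cast
    ring

theorem find_enumerate_none (ls : List (List Char)) (s : Int)
    (hall : ∀ l ∈ ls, PySem.Chars.startswith l ['@', '@'] = false) :
    (PySem.List.enumerate ls s).find? (fun p => PySem.Chars.startswith p.2 ['@', '@']) = none := by
  induction ls generalizing s with
  | nil => simp [PySem.List.enumerate]
  | cons l t ih =>
    simp only [PySem.List.enumerate_cons, List.find?_cons, hall l (by simp)]
    exact ih (s + 1) (fun x hx => hall x (by simp [hx]))

-- ===== VERDICT (by name: the statement is the Claim_ definition above) =====
theorem strip_first_hunk_minus_lines_py_spec : Claim_equal_strip_first_hunk_minus_lines_py := by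
  intro patch_text _
  show _ = _
  unfold strip_first_hunk_minus_lines_py strip_first_hunk_minus_lines_py_alt
  simp only []
  by_cases hs : PySem.Chars.strip patch_text.toList = []
  · simp [hs]
  · rw [if_neg hs, if_neg hs]
    set lines := PySem.Chars.splitlines patch_text.toList with hlines
    by_cases hany : (lines.any (fun l => PySem.Chars.startswith l ['@', '@'])) = true
    · -- there is a first hunk header: decompose lines = pre ++ h :: rest
      obtain ⟨pre, h, rest, hdec, hpre, hh⟩ :
          ∃ pre h rest, lines = pre ++ h :: rest ∧
            (∀ l ∈ pre, PySem.Chars.startswith l ['@', '@'] = false) ∧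
            PySem.Chars.startswith h ['@', '@'] = true := by
        have hdw : lines.dropWhile (fun l => !PySem.Chars.startswith l ['@', '@']) ≠ [] := by
          intro hnil
          rw [List.dropWhile_eq_nil_iff] at hnil
          simp only [List.any_eq_true] at hany
          obtain ⟨x, hx, hxs⟩ := hany
          have := hnil x hx
          simp [hxs] at this
        obtain ⟨h, rest, hht⟩ := List.exists_cons_of_ne_nil hdw
        refine ⟨lines.takeWhile (fun l => !PySem.Chars.startswith l ['@', '@']), h, rest, ?_, ?_, ?_⟩
        · rw [← hht, List.takeWhile_append_dropWhile]
        · intro l hl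
          have := List.mem_takeWhile_imp hl
          simpa using this
        · have := List.head_dropWhile_not (fun l => !PySem.Chars.startswith l ['@', '@']) hdw
          simp only [hht, List.head_cons] at this
          simpa using this
      rw [hany, hdec]
      rw [find_enumerate pre rest h 0 hpre hh]
      simp only [Bool.not_true, Bool.false_eq_true, if_false]
      simp only [Option.map_some, Option.getD_some]
      have hfh : ¬ ((0 : Int) + (pre.length : Int) < 0) := by omega
      rw [if_neg hfh]
      have htn : ((0 : Int) + (pre.length : Int)).toNat = pre.length := by simp
      have he : pvEndA (pre ++ h :: rest) (pre.length + 1) = (pre.length + 1) + pvE rest := by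
        have := pvEndA_append rest (pre ++ [h])
        simpa using this
      rw [htn, he]
      -- the three slices
      have h1 : PySem.List.slice (pre ++ h :: rest) none (some ((0:Int) + (pre.length:Int) + 1))
          = pre ++ [h] := by
        rw [PySem.List.slice_to _ (by omega)]
        have : ((0:Int) + (pre.length:Int) + 1).toNat = pre.length + 1 := by omega
        rw [this]
        simp [List.take_append]
      have h2 : PySem.List.slice (pre ++ h :: rest) (some ((0:Int) + (pre.length:Int) + 1))
            (some ((pre.length + 1 + pvE rest : Nat) : Int))
          = rest.take (pvE rest) := by
        have : ((0:Int) + (pre.length:Int) + 1) = ((pre.length + 1 : Nat) : Int) := by push_cast; ring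
        rw [this, PySem.List.slice_natCast]
        have hd : List.drop (pre.length + 1) (pre ++ h :: rest) = rest := by
          rw [show pre ++ h :: rest = (pre ++ [h]) ++ rest by simp]
          rw [List.drop_append_of_le_length (by simp)]
          simp
        rw [hd]
        congr 1
        omega
      have h3 : PySem.List.slice (pre ++ h :: rest) (some ((pre.length + 1 + pvE rest : Nat) : Int)) none
          = rest.drop (pvE rest) := by
        rw [PySem.List.slice_from _ (by omega)]
        rw [Int.toNat_natCast]
        rw [show pre ++ h :: rest = (pre ++ [h]) ++ rest by simp]
        rw [show pre.length + 1 + pvE rest = (pre ++ [h]).length + pvE rest by simp]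
        rw [List.drop_append]
        simp [List.drop_eq_nil_of_le]
      rw [h1, h2, h3]
      rw [pvLoopB_zero pre rest h hpre hh, pvLoopB_one rest]
      simp
    · -- no '@@' line at all
      simp only [Bool.not_eq_true] at hany
      rw [hany]
      have hall : ∀ l ∈ lines, PySem.Chars.startswith l ['@', '@'] = false := by
        intro l hl
        by_contra hc
        simp only [Bool.not_eq_false] at hc
        have : lines.any (fun l => PySem.Chars.startswith l ['@', '@']) = true :=
          List.any_eq_true.mpr ⟨l, hl, hc⟩
        simp [this] at hany
      rw [find_enumerate_none lines 0 hall]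
      simp
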